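-- pv_equiv track=rewrite | github.com/spartan289/PycharmProjects | learn/HILLSEQ.py | hillseq
-- ===== SOURCE A (Python) =====
-- def hillseq(arr,n):
--     hash={}
--     arr.sort()
--     arr.reverse()
--     flag=0
--
--     for i in range(n):
--         if arr[i] in hash:
--             flag=1
--             if hash[arr[i]]==2:
--                 return [-1]
--             else:
--                 hash[arr[i]]+=1
--         else:
--             hash[arr[i]]=1
--     if hash[arr[0]]>1:
--         return [-1]
--     if flag==1:
--         result=[]
--         for i in hash:
--             result.append(i)
--             hash[i]-=1
--         j=0
--         for i in hash:
--             if hash[i]==1: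
--                 result.insert(0,i)
--                 j+=1
--         return result
--     if flag==0:
--         return arr
-- ===== SOURCE B (Python) =====
-- def hillseq(arr, n):
--     # Like A, sorts arr in place (descending); equivalence is about the return value.
--     # Single adjacency scan over the first n slots of the sorted array: runs of equal
--     # values are adjacent, so no hash/counter is needed at all.
--     arr.sort(reverse=True)
--     desc = []      # run heads = distinct values, in descending order
--     twice = []     # values whose run reached length 2, in descending order
--     run = 0
--     for i in range(n):
--         v = arr[i]
--         if desc and desc[-1] == v:
--             run += 1
--             if run == 3:
--                 return [-1]
--             twice.append(v)
--         else:
--             desc.append(v)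
--             run = 1
--     if desc[0] in twice:       # the maximum value may not be doubled
--         return [-1]
--     if not twice:
--         return arr
--     twice.reverse()
--     return twice + desc
-- ===== Notes on version B (the rewrite author's own statement) =====
-- stated objective: alternative
-- what changed: B drops A's hash-table counting entirely: it scans the sorted prefix once, detecting runs of equal adjacent values, and builds the doubled-values and distinct-values lists directly during that scan instead of A's count-then-append-all-keys-then-insert-at-front passes over a mutated dict.
import Mathlib
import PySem

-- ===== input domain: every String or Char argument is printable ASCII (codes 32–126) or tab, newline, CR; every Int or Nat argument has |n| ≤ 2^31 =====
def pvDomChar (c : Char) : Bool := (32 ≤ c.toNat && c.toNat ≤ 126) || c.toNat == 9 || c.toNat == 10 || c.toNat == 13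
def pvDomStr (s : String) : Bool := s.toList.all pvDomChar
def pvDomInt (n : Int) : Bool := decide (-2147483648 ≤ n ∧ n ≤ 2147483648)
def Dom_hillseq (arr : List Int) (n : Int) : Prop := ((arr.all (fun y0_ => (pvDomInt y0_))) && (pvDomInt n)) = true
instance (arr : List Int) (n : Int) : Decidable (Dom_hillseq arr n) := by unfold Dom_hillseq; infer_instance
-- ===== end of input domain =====

-- B replaces A's hash-table counting and its append-then-insert-at-front result passes by a
-- single adjacency scan over the sorted prefix (runs of equal values are adjacent), building
-- the doubled and distinct value lists directly; objective: alternative (no dict at all).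
-- Note: like A, B sorts its list argument in place; the equivalence proved here is about the
-- return value only (both perform the same mutation: sort descending).


-- ===== PORT A =====
-- the 'for i in range(n)' loop; range(n) is iterated lazily (i counts up, as in Python) rather
-- than materialized. State is (hash, flag); Sum.inl = early 'return [-1]' (or an IndexError,
-- excluded by Pre_), Sum.inr = loop ran to the end
def hillseqLoop (arr : List Int) (n : Int) (i : Int) (h : PySem.Dict Int Int) (flag : Int) :
    (List Int) ⊕ (PySem.Dict Int Int × Int) :=
  if _hlt : i < n then
    match PySem.List.pyGet? arr i with
    | none => Sum.inl []                          -- IndexError (n > len(arr)); excluded by Pre_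
    | some v =>
      if h.contains v then                        -- 'if arr[i] in hash'
        if h.getD v 0 == 2 then Sum.inl [-1]      -- 'if hash[arr[i]]==2: return [-1]'
        else hillseqLoop arr n (i + 1) (h.insert v (h.getD v 0 + 1)) 1
      else hillseqLoop arr n (i + 1) (h.insert v 1) flag
  else Sum.inr (h, flag)
termination_by (n - i).toNat
decreasing_by all_goals omega

def hillseq (arr : List Int) (n : Int) : List Int :=
  let arrD := (PySem.List.sorted arr (fun x => x) false).reverse   -- arr.sort(); arr.reverse()
  match hillseqLoop arrD n 0 PySem.Dict.empty 0 with
  | Sum.inl r => r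
  | Sum.inr (h, flag) =>
    match arrD.head? with
    | none => []                                  -- arr[0] IndexError (empty arr); excluded by Pre_
    | some a0 =>
      match h.get? a0 with
      | none => []                                -- 'hash[arr[0]]' KeyError (n ≤ 0); excluded by Pre_
      | some c0 =>
        if c0 > 1 then [-1]
        else if flag == 1 then
          -- 'for i in hash: result.append(i); hash[i]-=1'
          let p := h.keys.foldl
            (fun (st : List Int × PySem.Dict Int Int) k =>
              (st.1 ++ [k], st.2.modify k 0 (fun x => x - 1))) ([], h)
          -- 'for i in hash: if hash[i]==1: result.insert(0,i)'
          p.2.keys.foldl (fun res k => if p.2.getD k 0 == 1 then k :: res else res) p.1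
        else if flag == 0 then arrD
        else []                                   -- unreachable: flag is always 0 or 1

-- ===== PORT B =====
-- the 'for i in range(n)' adjacency scan; i counts up as in Python; state is (desc, twice, run);
-- Sum.inl = early 'return [-1]' (or an IndexError, excluded by Pre_), Sum.inr = loop finished
def hillseqAltLoop (arr : List Int) (n : Int) (i : Int) (desc twice : List Int) (run : Int) :
    (List Int) ⊕ (List Int × List Int) :=
  if _hlt : i < n then
    match PySem.List.pyGet? arr i with
    | none => Sum.inl []                          -- IndexError (n > len(arr)); excluded by Pre_
    | some v =>
      if desc.getLast? = some v then              -- 'if desc and desc[-1] == v'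
        if run + 1 == 3 then Sum.inl [-1]         -- 'run += 1; if run == 3: return [-1]'
        else hillseqAltLoop arr n (i + 1) desc (twice ++ [v]) (run + 1)   -- 'twice.append(v)'
      else hillseqAltLoop arr n (i + 1) (desc ++ [v]) twice 1  -- 'desc.append(v); run = 1'
  else Sum.inr (desc, twice)
termination_by (n - i).toNat
decreasing_by all_goals omega

def hillseq_alt (arr : List Int) (n : Int) : List Int :=
  let arrD := PySem.List.sorted arr (fun x => x) true           -- arr.sort(reverse=True)
  match hillseqAltLoop arrD n 0 [] [] 0 with
  | Sum.inl r => r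
  | Sum.inr (desc, twice) =>
    match desc.head? with
    | none => []                       -- 'desc[0]' IndexError (n < 1); excluded by Pre_
    | some d0 =>
      if twice.contains d0 then [-1]   -- 'if desc[0] in twice: return [-1]'
      else if twice = [] then arrD     -- 'if not twice: return arr'
      else twice.reverse ++ desc       -- 'twice.reverse(); return twice + desc'

-- ===== PRECONDITION & SPEC =====
-- Pre_ is exactly the set of inputs on which A returns normally: n ≥ 1 and either n ≤ len(arr)
-- or some value occurs ≥ 3 times (then the loop hits its third occurrence and returns [-1]
-- before the IndexError); on every other input A raises (IndexError or KeyError).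
def Pre_hillseq (arr : List Int) (n : Int) : Prop :=
  1 ≤ n ∧ (n ≤ (arr.length : Int) ∨ ∃ v ∈ arr, 3 ≤ arr.count v)
instance (arr : List Int) (n : Int) : Decidable (Pre_hillseq arr n) := by
  unfold Pre_hillseq; infer_instance
def pvWitness_hillseq : List Int × Int := ([3, 1, 2, 1], 4)
def Spec_hillseq (arr : List Int) (n : Int) (out : List Int) : Prop := out = hillseq_alt arr n
instance (arr : List Int) (n : Int) (out : List Int) : Decidable (Spec_hillseq arr n out) := by
  unfold Spec_hillseq; infer_instance

-- ===== CLAIM (what is proved, stated in full; the proofs are below) =====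
def Claim_equal_hillseq : Prop := ∀ (arr : List Int) (n : Int), Dom_hillseq arr n →
  Pre_hillseq arr n → Spec_hillseq arr n (hillseq arr n)
-- ===== LEMMAS AND PROOFS =====

-- proof-side element-level form of A's loop (same state machine, driven by the list of
-- elements instead of indices)
def hillseqLoopE (es : List Int) (h : PySem.Dict Int Int) (flag : Int) :
    (List Int) ⊕ (PySem.Dict Int Int × Int) :=
  match es with
  | [] => Sum.inr (h, flag)
  | v :: rest =>
    if h.contains v then
      if h.getD v 0 == 2 then Sum.inl [-1]
      else hillseqLoopE rest (h.insert v (h.getD v 0 + 1)) 1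
    else hillseqLoopE rest (h.insert v 1) flag

lemma hillseqLoop_eq_loopE (arr : List Int) (n : Int) : ∀ (m : Nat) (i : Int)
    (h : PySem.Dict Int Int) (flag : Int), (n - i).toNat = m →
    (∀ j ∈ PySem.List.pyRange i n, (PySem.List.pyGet? arr j).isSome) →
    hillseqLoop arr n i h flag =
      hillseqLoopE ((PySem.List.pyRange i n).map (fun j => PySem.List.pyGetD arr j 0)) h flag := by
  intro m
  induction m with
  | zero =>
    intro i h flag hm _
    have hge : ¬ i < n := by omega
    have hnil : PySem.List.pyRange i n = [] := by
      apply List.eq_nil_iff_forall_not_mem.mpr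
      intro j hj
      have := PySem.List.mem_pyRange_one.mp hj
      omega
    rw [hillseqLoop, dif_neg hge, hnil]
    rfl
  | succ m ih =>
    intro i h flag hm hsome
    by_cases hlt : i < n
    · have hcons : PySem.List.pyRange i n = i :: PySem.List.pyRange (i + 1) n :=
        PySem.List.pyRange_one_cons hlt
      obtain ⟨v, hv⟩ := Option.isSome_iff_exists.mp
        (hsome i (by rw [hcons]; exact List.mem_cons_self))
      have hgd : PySem.List.pyGetD arr i 0 = v := by
        show (PySem.List.pyGet? arr i).getD 0 = v
        simp [hv]
      have hrest : ∀ j ∈ PySem.List.pyRange (i + 1) n, (PySem.List.pyGet? arr j).isSome := by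
        intro j hj
        exact hsome j (by rw [hcons]; exact List.mem_cons_of_mem _ hj)
      rw [hillseqLoop, dif_pos hlt, hcons]
      simp only [hv, List.map_cons, hgd, hillseqLoopE]
      split
      · split
        · rfl
        · exact ih (i + 1) _ _ (by omega) hrest
      · exact ih (i + 1) _ _ (by omega) hrest
    · have hnil : PySem.List.pyRange i n = [] := by
        apply List.eq_nil_iff_forall_not_mem.mpr
        intro j hj
        have := PySem.List.mem_pyRange_one.mp hj
        omega
      rw [hillseqLoop, dif_neg hlt, hnil]
      rfl

-- when the element-level loop over ALL valid indices already returns early, A's index loop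
-- returns the same value even if n overshoots the length (it never reaches the bad index)
lemma hillseqLoop_inl (arr : List Int) (n : Int) (hn : (arr.length : Int) ≤ n) :
    ∀ (m : Nat) (i : Int) (h : PySem.Dict Int Int) (flag : Int) (r : List Int),
    ((arr.length : Int) - i).toNat = m →
    (∀ j ∈ PySem.List.pyRange i (arr.length : Int), (PySem.List.pyGet? arr j).isSome) →
    hillseqLoopE ((PySem.List.pyRange i (arr.length : Int)).map
      (fun j => PySem.List.pyGetD arr j 0)) h flag = Sum.inl r →
    hillseqLoop arr n i h flag = Sum.inl r := by
  intro m
  induction m with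
  | zero =>
    intro i h flag r hm _ hE
    have hnil : PySem.List.pyRange i (arr.length : Int) = [] := by
      apply List.eq_nil_iff_forall_not_mem.mpr
      intro j hj
      have := PySem.List.mem_pyRange_one.mp hj
      omega
    rw [hnil] at hE
    simp [hillseqLoopE] at hE
  | succ m ih =>
    intro i h flag r hm hsome hE
    have hlt : i < (arr.length : Int) := by omega
    have hltn : i < n := by omega
    have hcons : PySem.List.pyRange i (arr.length : Int) =
        i :: PySem.List.pyRange (i + 1) (arr.length : Int) :=
      PySem.List.pyRange_one_cons hlt
    obtain ⟨v, hv⟩ := Option.isSome_iff_exists.mp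
      (hsome i (by rw [hcons]; exact List.mem_cons_self))
    have hgd : PySem.List.pyGetD arr i 0 = v := by
      show (PySem.List.pyGet? arr i).getD 0 = v
      simp [hv]
    have hrest : ∀ j ∈ PySem.List.pyRange (i + 1) (arr.length : Int),
        (PySem.List.pyGet? arr j).isSome := by
      intro j hj
      exact hsome j (by rw [hcons]; exact List.mem_cons_of_mem _ hj)
    rw [hcons] at hE
    simp only [List.map_cons, hgd, hillseqLoopE] at hE
    rw [hillseqLoop, dif_pos hltn, hv]
    show (if h.contains v = true then
        if (h.getD v 0 == 2) = true then Sum.inl [-1]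
        else hillseqLoop arr n (i + 1) (h.insert v (h.getD v 0 + 1)) 1
      else hillseqLoop arr n (i + 1) (h.insert v 1) flag) = Sum.inl r
    by_cases hcv : h.contains v = true
    · rw [if_pos hcv] at hE ⊢
      by_cases h2 : (h.getD v 0 == 2) = true
      · rw [if_pos h2] at hE ⊢
        exact hE
      · rw [if_neg h2] at hE ⊢
        exact ih (i + 1) _ _ _ (by omega) hrest hE
    · rw [if_neg hcv] at hE ⊢
      exact ih (i + 1) _ _ _ (by omega) hrest hE

lemma map_pyGetD_pyRange_take (xs : List Int) : ∀ (k : Nat), k ≤ xs.length →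
    (PySem.List.pyRange 0 (k : Int)).map (fun i => PySem.List.pyGetD xs i 0) = xs.take k := by
  intro k hk
  rw [PySem.List.pyRange_zero_natCast, List.map_map]
  simp only [Function.comp_def, PySem.List.pyGetD_natCast]
  induction k with
  | zero => simp
  | succ m ih =>
    rw [List.range_succ, List.map_append, ih (by omega), List.take_add_one]
    simp [List.getD, List.getElem?_eq_getElem (by omega : m < xs.length)]

lemma step_iff (h : PySem.Dict Int Int) (v : Int) (rest : List Int) (B : Int) :
    ((∃ w ∈ rest, B ≤ (h.insert v (h.getD v 0 + 1)).getD w 0 + (rest.count w : Int)) ∨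
      B ≤ h.getD v 0 + 1)
    ↔ ∃ w ∈ v :: rest, B ≤ h.getD w 0 + (((v :: rest).count w : Nat) : Int) := by
  constructor
  · rintro (⟨w, hw, hcw⟩ | hd)
    · by_cases hwv : w = v
      · subst hwv
        refine ⟨w, List.mem_cons_self, ?_⟩
        rw [PySem.Dict.getD_insert_self] at hcw
        have hc : (w :: rest).count w = rest.count w + 1 := by simp
        rw [hc]; push_cast; omega
      · refine ⟨w, List.mem_cons_of_mem _ hw, ?_⟩
        rw [PySem.Dict.getD_insert_of_ne h _ _ hwv] at hcw
        have hc : (v :: rest).count w = rest.count w := by simp [List.count_cons]; exact fun hh => hwv hh.symm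
        rw [hc]; exact hcw
    · refine ⟨v, List.mem_cons_self, ?_⟩
      have hc : (v :: rest).count v = rest.count v + 1 := by simp
      rw [hc]; push_cast; omega
  · rintro ⟨w, hw, hcw⟩
    by_cases hwv : w = v
    · subst hwv
      have hc : (w :: rest).count w = rest.count w + 1 := by simp
      rw [hc] at hcw; push_cast at hcw
      by_cases hvr : w ∈ rest
      · left
        refine ⟨w, hvr, ?_⟩
        rw [PySem.Dict.getD_insert_self]
        omega
      · right
        have : rest.count w = 0 := List.count_eq_zero_of_not_mem hvr
        omega
    · rcases List.mem_cons.mp hw with h1 | h1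
      · exact absurd h1 hwv
      · left
        refine ⟨w, h1, ?_⟩
        rw [PySem.Dict.getD_insert_of_ne h _ _ hwv]
        have hc : (v :: rest).count w = rest.count w := by simp [List.count_cons]; exact fun hh => hwv hh.symm
        rw [hc] at hcw; exact hcw

lemma loopE_spec (es : List Int) : ∀ (h : PySem.Dict Int Int) (flag : Int),
    (∀ v, h.contains v = true → h.getD v 0 = 1 ∨ h.getD v 0 = 2) →
    hillseqLoopE es h flag =
      if ∃ v ∈ es, 3 ≤ h.getD v 0 + (es.count v : Int) then Sum.inl [-1]
      else Sum.inr (es.foldl (fun d x => d.insert x (d.getD x 0 + 1)) h,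
        if ∃ v ∈ es, 2 ≤ h.getD v 0 + (es.count v : Int) then 1 else flag) := by
  induction es with
  | nil => intro h flag hinv; simp [hillseqLoopE]
  | cons v rest ih =>
    intro h flag hinv
    by_cases hc : h.contains v = true
    · rcases hinv v hc with h1 | h2
      · -- stored count 1: recurse with value 2, flag := 1
        have hinv' : ∀ w, (h.insert v (h.getD v 0 + 1)).contains w = true →
            (h.insert v (h.getD v 0 + 1)).getD w 0 = 1 ∨ (h.insert v (h.getD v 0 + 1)).getD w 0 = 2 := by
          intro w hw
          by_cases hwv : w = v
          · subst hwv; right; rw [PySem.Dict.getD_insert_self, h1]; norm_num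
          · rw [PySem.Dict.getD_insert_of_ne h _ _ hwv]
            apply hinv
            rw [PySem.Dict.contains_insert] at hw
            simpa [hwv] using hw
        have estep : hillseqLoopE (v :: rest) h flag =
            hillseqLoopE rest (h.insert v (h.getD v 0 + 1)) 1 := by
          simp [hillseqLoopE, hc, h1]
        rw [estep, ih _ _ hinv']
        have h3 := step_iff h v rest 3
        have h3' : (∃ w ∈ rest, 3 ≤ (h.insert v (h.getD v 0 + 1)).getD w 0 + (rest.count w : Int)) ↔
            (∃ w ∈ v :: rest, 3 ≤ h.getD w 0 + ((v :: rest).count w : Int)) := by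
          constructor
          · intro q; exact h3.mp (Or.inl q)
          · intro q; rcases h3.mpr q with q' | q'
            · exact q'
            · rw [h1] at q'; exact absurd q' (by norm_num)
        have h2' : ∃ w ∈ v :: rest, 2 ≤ h.getD w 0 + ((v :: rest).count w : Int) := by
          apply (step_iff h v rest 2).mp
          right; rw [h1]; norm_num
        by_cases hP3 : ∃ w ∈ v :: rest, 3 ≤ h.getD w 0 + ((v :: rest).count w : Int)
        · rw [if_pos (h3'.mpr hP3), if_pos hP3]
        · rw [if_neg (fun q => hP3 (h3'.mp q)), if_neg hP3]
          simp only [List.foldl_cons]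
          rw [if_pos h2', ite_self]
      · -- stored count 2: third occurrence, early return [-1]
        have estep : hillseqLoopE (v :: rest) h flag = Sum.inl [-1] := by
          simp [hillseqLoopE, hc, h2]
        have hP3 : ∃ w ∈ v :: rest, 3 ≤ h.getD w 0 + ((v :: rest).count w : Int) := by
          refine ⟨v, List.mem_cons_self, ?_⟩
          have hcn : (v :: rest).count v = rest.count v + 1 := by simp
          rw [hcn, h2]; push_cast; omega
        rw [estep, if_pos hP3]
    · -- new key: insert with count 1
      have h0 : h.getD v 0 = 0 :=
        PySem.Dict.getD_of_not_contains h 0 (by simpa using hc)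
      have hinv' : ∀ w, (h.insert v 1).contains w = true →
          (h.insert v 1).getD w 0 = 1 ∨ (h.insert v 1).getD w 0 = 2 := by
        intro w hw
        by_cases hwv : w = v
        · subst hwv; left; rw [PySem.Dict.getD_insert_self]
        · rw [PySem.Dict.getD_insert_of_ne h _ _ hwv]
          apply hinv
          rw [PySem.Dict.contains_insert] at hw
          simpa [hwv] using hw
      have estep : hillseqLoopE (v :: rest) h flag =
          hillseqLoopE rest (h.insert v 1) flag := by
        simp [hillseqLoopE, hc]
      have hfold : (v :: rest).foldl (fun d x => d.insert x (d.getD x 0 + 1)) h =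
          rest.foldl (fun d x => d.insert x (d.getD x 0 + 1)) (h.insert v 1) := by
        simp only [List.foldl_cons, h0, zero_add]
      rw [estep, ih _ _ hinv']
      have mk : ∀ B : Int, 2 ≤ B →
          ((∃ w ∈ rest, B ≤ (h.insert v 1).getD w 0 + (rest.count w : Int)) ↔
          (∃ w ∈ v :: rest, B ≤ h.getD w 0 + ((v :: rest).count w : Int))) := by
        intro B hB
        have hs := step_iff h v rest B
        rw [h0, zero_add] at hs
        constructor
        · intro q; exact hs.mp (Or.inl q)
        · intro q; rcases hs.mpr q with q' | q'
          · exact q'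
          · exact absurd q' (by omega)
      have h3' := mk 3 (by omega)
      have h2'' := mk 2 (by omega)
      by_cases hP3 : ∃ w ∈ v :: rest, 3 ≤ h.getD w 0 + ((v :: rest).count w : Int)
      · rw [if_pos (h3'.mpr hP3), if_pos hP3]
      · rw [if_neg (fun q => hP3 (h3'.mp q)), if_neg hP3, hfold]
        by_cases hP2 : ∃ w ∈ v :: rest, 2 ≤ h.getD w 0 + ((v :: rest).count w : Int)
        · rw [if_pos (h2''.mpr hP2), if_pos hP2]
        · rw [if_neg (fun q => hP2 (h2''.mp q)), if_neg hP2]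

lemma sorted_rev_eq_reverse_sorted (arr : List Int) :
    PySem.List.sorted arr (fun x => x) true = (PySem.List.sorted arr (fun x => x) false).reverse := by
  apply PySem.List.eq_of_perm_of_pairwise_le_of_injective (fun x : Int => -x) neg_injective
  · exact (PySem.List.sorted_perm arr (fun x => x) true).trans
      ((PySem.List.sorted_perm arr (fun x => x) false).symm.trans (List.reverse_perm _).symm)
  · exact (PySem.List.sorted_pairwise_rev arr (fun x => x)).imp (by intro a b hab; omega)
  · rw [List.pairwise_reverse]
    exact (PySem.List.sorted_pairwise arr (fun x => x)).imp (by intro a b hab; omega)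

-- proof-side element-level form of B's scan (same state machine, driven by the list of
-- elements instead of indices)
def hillseqAltLoopE : List Int → List Int → List Int → Int → (List Int) ⊕ (List Int × List Int)
  | [], desc, twice, _run => Sum.inr (desc, twice)
  | v :: rest, desc, twice, run =>
    if desc.getLast? = some v then
      if run + 1 == 3 then Sum.inl [-1]
      else hillseqAltLoopE rest desc (twice ++ [v]) (run + 1)
    else hillseqAltLoopE rest (desc ++ [v]) twice 1

lemma altLoop_eq_loopE (arr : List Int) (n : Int) : ∀ (m : Nat) (i : Int)
    (desc twice : List Int) (run : Int), (n - i).toNat = m →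
    (∀ j ∈ PySem.List.pyRange i n, (PySem.List.pyGet? arr j).isSome) →
    hillseqAltLoop arr n i desc twice run =
      hillseqAltLoopE ((PySem.List.pyRange i n).map (fun j => PySem.List.pyGetD arr j 0))
        desc twice run := by
  intro m
  induction m with
  | zero =>
    intro i desc twice run hm _
    have hge : ¬ i < n := by omega
    have hnil : PySem.List.pyRange i n = [] := by
      apply List.eq_nil_iff_forall_not_mem.mpr
      intro j hj
      have := PySem.List.mem_pyRange_one.mp hj
      omega
    rw [hillseqAltLoop, dif_neg hge, hnil]
    rfl
  | succ m ih =>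
    intro i desc twice run hm hsome
    by_cases hlt : i < n
    · have hcons : PySem.List.pyRange i n = i :: PySem.List.pyRange (i + 1) n :=
        PySem.List.pyRange_one_cons hlt
      obtain ⟨v, hv⟩ := Option.isSome_iff_exists.mp
        (hsome i (by rw [hcons]; exact List.mem_cons_self))
      have hgd : PySem.List.pyGetD arr i 0 = v := by
        show (PySem.List.pyGet? arr i).getD 0 = v
        simp [hv]
      have hrest : ∀ j ∈ PySem.List.pyRange (i + 1) n, (PySem.List.pyGet? arr j).isSome := by
        intro j hj
        exact hsome j (by rw [hcons]; exact List.mem_cons_of_mem _ hj)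
      rw [hillseqAltLoop, dif_pos hlt, hcons]
      simp only [hv, List.map_cons, hgd, hillseqAltLoopE]
      split
      · split
        · rfl
        · exact ih (i + 1) _ _ _ (by omega) hrest
      · exact ih (i + 1) _ _ _ (by omega) hrest
    · have hnil : PySem.List.pyRange i n = [] := by
        apply List.eq_nil_iff_forall_not_mem.mpr
        intro j hj
        have := PySem.List.mem_pyRange_one.mp hj
        omega
      rw [hillseqAltLoop, dif_neg hlt, hnil]
      rfl

-- when the element-level scan over ALL valid indices already returns early, B's index loop
-- returns the same value even if n overshoots the length (it never reaches the bad index)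
lemma altLoop_inl (arr : List Int) (n : Int) (hn : (arr.length : Int) ≤ n) :
    ∀ (m : Nat) (i : Int) (desc twice : List Int) (run : Int) (r : List Int),
    ((arr.length : Int) - i).toNat = m →
    (∀ j ∈ PySem.List.pyRange i (arr.length : Int), (PySem.List.pyGet? arr j).isSome) →
    hillseqAltLoopE ((PySem.List.pyRange i (arr.length : Int)).map
      (fun j => PySem.List.pyGetD arr j 0)) desc twice run = Sum.inl r →
    hillseqAltLoop arr n i desc twice run = Sum.inl r := by
  intro m
  induction m with
  | zero =>
    intro i desc twice run r hm _ hE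
    have hnil : PySem.List.pyRange i (arr.length : Int) = [] := by
      apply List.eq_nil_iff_forall_not_mem.mpr
      intro j hj
      have := PySem.List.mem_pyRange_one.mp hj
      omega
    rw [hnil] at hE
    simp [hillseqAltLoopE] at hE
  | succ m ih =>
    intro i desc twice run r hm hsome hE
    have hlt : i < (arr.length : Int) := by omega
    have hltn : i < n := by omega
    have hcons : PySem.List.pyRange i (arr.length : Int) =
        i :: PySem.List.pyRange (i + 1) (arr.length : Int) :=
      PySem.List.pyRange_one_cons hlt
    obtain ⟨v, hv⟩ := Option.isSome_iff_exists.mp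
      (hsome i (by rw [hcons]; exact List.mem_cons_self))
    have hgd : PySem.List.pyGetD arr i 0 = v := by
      show (PySem.List.pyGet? arr i).getD 0 = v
      simp [hv]
    have hrest : ∀ j ∈ PySem.List.pyRange (i + 1) (arr.length : Int),
        (PySem.List.pyGet? arr j).isSome := by
      intro j hj
      exact hsome j (by rw [hcons]; exact List.mem_cons_of_mem _ hj)
    rw [hcons] at hE
    simp only [List.map_cons, hgd, hillseqAltLoopE] at hE
    rw [hillseqAltLoop, dif_pos hltn, hv]
    show (if desc.getLast? = some v then
        if run + 1 == 3 then Sum.inl [-1]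
        else hillseqAltLoop arr n (i + 1) desc (twice ++ [v]) (run + 1)
      else hillseqAltLoop arr n (i + 1) (desc ++ [v]) twice 1) = Sum.inl r
    by_cases hlv : desc.getLast? = some v
    · rw [if_pos hlv] at hE ⊢
      by_cases h3 : (run + 1 == 3) = true
      · rw [if_pos h3] at hE ⊢
        exact hE
      · rw [if_neg h3] at hE ⊢
        exact ih (i + 1) _ _ _ _ (by omega) hrest hE
    · rw [if_neg hlv] at hE ⊢
      exact ih (i + 1) _ _ _ _ (by omega) hrest hE

-- B-side: folding Set.add over a list not containing v commutes with a leading v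
lemma foldl_add_cons : ∀ (rest s : List Int) (v : Int), v ∉ rest →
    rest.foldl PySem.Set.add (v :: s) = v :: rest.foldl PySem.Set.add s
  | [], s, v, _ => rfl
  | x :: rest, s, v, hv => by
    have hxv : x ≠ v := fun he => hv (he ▸ List.mem_cons_self)
    have hstep : PySem.Set.add (v :: s) x = v :: PySem.Set.add s x := by
      simp only [PySem.Set.add, PySem.Set.contains]
      by_cases hc : x ∈ s
      · simp [hc, hxv]
      · simp [hc, hxv]
    simp only [List.foldl_cons, hstep]
    exact foldl_add_cons rest (PySem.Set.add s x) v (fun hm => hv (List.mem_cons_of_mem _ hm))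

-- folding Set.add never changes the head of a nonempty accumulator
lemma foldl_add_head : ∀ (rest s : List Int), s ≠ [] →
    (rest.foldl PySem.Set.add s).head? = s.head?
  | [], s, _ => rfl
  | x :: rest, s, hs => by
    have hne : PySem.Set.add s x ≠ [] := by
      simp only [PySem.Set.add]
      split
      · exact hs
      · simp
    have hh : (PySem.Set.add s x).head? = s.head? := by
      simp only [PySem.Set.add]
      split
      · rfl
      · rw [List.head?_append_of_ne_nil _ hs]
    simp only [List.foldl_cons]
    rw [foldl_add_head rest _ hne, hh]

lemma ofList_replicate_append (m : Nat) (hm : 1 ≤ m) (v : Int) (rest : List Int) (hv : v ∉ rest) :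
    PySem.Set.ofList (List.replicate m v ++ rest) = v :: PySem.Set.ofList rest := by
  have hrep : ∀ (j : Nat), (List.replicate j v).foldl PySem.Set.add [v] = [v] := by
    intro j
    induction j with
    | zero => rfl
    | succ j ih =>
      rw [List.replicate_succ, List.foldl_cons]
      have : PySem.Set.add [v] v = [v] := by
        simp [PySem.Set.add, PySem.Set.contains]
      rw [this, ih]
  obtain ⟨j, rfl⟩ : ∃ j, m = j + 1 := ⟨m - 1, by omega⟩
  rw [PySem.Set.ofList_eq_foldl, PySem.Set.ofList_eq_foldl, List.foldl_append,
    List.replicate_succ, List.foldl_cons]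
  have h1 : PySem.Set.add ([] : List Int) v = [v] := by
    simp [PySem.Set.add, PySem.Set.contains]
  rw [h1, hrep j]
  exact foldl_add_cons rest [] v hv

-- one full run of B's scan: m ≥ 1 copies of v (v not ending desc) are consumed as one
-- desc entry, one twice entry iff m = 2, and an early return iff m ≥ 3
lemma altLoop_run (m : Nat) (hm : 1 ≤ m) (v : Int) (rest desc twice : List Int) (run : Int)
    (hv : desc.getLast? ≠ some v) :
    hillseqAltLoopE (List.replicate m v ++ rest) desc twice run =
      if 3 ≤ m then Sum.inl [-1]
      else hillseqAltLoopE rest (desc ++ [v]) (twice ++ if m == 2 then [v] else []) (m : Int) := by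
  have hlast : (desc ++ [v]).getLast? = some v := by simp
  rcases (by omega : m = 1 ∨ m = 2 ∨ 3 ≤ m) with rfl | h | h3
  · simp only [List.replicate_succ, List.replicate_zero, List.nil_append, List.cons_append,
      hillseqAltLoopE, if_neg hv]
    norm_num
  · subst h
    simp only [List.replicate_succ, List.replicate_zero, List.nil_append, List.cons_append,
      hillseqAltLoopE, if_neg hv, hlast, if_pos]
    norm_num
  · obtain ⟨j, rfl⟩ : ∃ j, m = j + 3 := ⟨m - 3, by omega⟩
    simp only [List.replicate_succ, List.cons_append, hillseqAltLoopE, if_neg hv, hlast, if_pos]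
    norm_num

-- B's scan on a descending list: early Sum.inl [-1] iff some value occurs ≥ 3 times; otherwise
-- desc accumulates the distinct values in order and twice the values occurring exactly twice
lemma altLoop_spec : ∀ (len : Nat) (xs : List Int), xs.length ≤ len →
    xs.Pairwise (fun a b => b ≤ a) →
    ∀ (desc twice : List Int) (run : Int), (∀ x ∈ xs, desc.getLast? ≠ some x) →
    hillseqAltLoopE xs desc twice run =
      if ∃ v ∈ xs, 3 ≤ xs.count v then Sum.inl [-1]
      else Sum.inr (desc ++ PySem.Set.ofList xs,
        twice ++ (PySem.Set.ofList xs).filter (fun v => xs.count v == 2)) := by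
  intro len
  induction len with
  | zero =>
    intro xs hlen _ desc twice run _
    cases xs with
    | nil => simp [hillseqAltLoopE, PySem.Set.ofList_eq_foldl]
    | cons v t => simp at hlen
  | succ len ih =>
    intro xs hlen hpw desc twice run hinv
    cases xs with
    | nil => simp [hillseqAltLoopE, PySem.Set.ofList_eq_foldl]
    | cons v t =>
      have hle : ∀ x ∈ t, x ≤ v := fun x hx => (List.pairwise_cons.mp hpw).1 x hx
      have hpt : t.Pairwise (fun a b : Int => b ≤ a) := (List.pairwise_cons.mp hpw).2
      set r := t.dropWhile (fun x => x == v) with hr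
      set tw := t.takeWhile (fun x => x == v) with htw
      have htd : tw ++ r = t := List.takeWhile_append_dropWhile
      have htwrep : tw = List.replicate tw.length v :=
        List.eq_replicate_of_mem (fun b hb => by
          have := List.mem_takeWhile_imp hb
          simpa using this)
      set m := tw.length + 1 with hm
      have hrsub : r.Sublist t := hr ▸ List.dropWhile_sublist _
      have hrpw : r.Pairwise (fun a b : Int => b ≤ a) := hpt.sublist hrsub
      have hvr : v ∉ r := by
        intro hmem
        rcases hq : r with _ | ⟨y, r'⟩
        · rw [hq] at hmem; cases hmem
        · have hne : t.dropWhile (fun x : Int => x == v) ≠ [] := by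
            rw [← hr, hq]; simp
          have hhead := List.head_dropWhile_not (fun x : Int => x == v) hne
          have h2 : (t.dropWhile (fun x : Int => x == v)).head? = some y := by
            rw [← hr, hq]; rfl
          have h3 := List.head?_eq_some_head hne
          rw [h2] at h3
          have hyv : y ≠ v := by
            have : ((y : Int) == v) = false := by
              rw [Option.some.injEq] at h3
              rw [← h3] at hhead
              exact hhead
            simpa using this
          rw [hq] at hmem
          rcases List.mem_cons.mp hmem with rfl | hmem'
          · exact hyv rfl
          · have h1 : v ≤ y := by
              rw [hq] at hrpw
              exact (List.pairwise_cons.mp hrpw).1 v hmem'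
            have h2 : y ≤ v := hle y (hrsub.mem (hq ▸ List.mem_cons_self))
            exact hyv (by omega)
      have hxs : v :: t = List.replicate m v ++ r := by
        conv_lhs => rw [← htd, htwrep]
        rw [hm, List.replicate_succ, List.cons_append]
      have hrlen : r.length ≤ len := by
        have h1 := hrsub.length_le
        simp only [List.length_cons] at hlen
        omega
      have hcv : (v :: t).count v = m := by
        rw [hxs, List.count_append, List.count_replicate]
        simp [List.count_eq_zero.mpr hvr]
      have hcw : ∀ w : Int, w ≠ v → (v :: t).count w = r.count w := by
        intro w hw
        rw [hxs, List.count_append, List.count_replicate]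
        simp [Ne.symm hw]
      have hmemr : ∀ w, w ∈ v :: t → w ≠ v → w ∈ r := by
        intro w hw hwv
        rcases List.mem_cons.mp hw with rfl | hwt
        · exact absurd rfl hwv
        · rw [← htd] at hwt
          rcases List.mem_append.mp hwt with h1 | h1
          · rw [htwrep] at h1
            exact absurd (List.eq_of_mem_replicate h1) hwv
          · exact h1
      have hinv' : ∀ x ∈ r, (desc ++ [v]).getLast? ≠ some x := by
        intro x hx
        simp only [List.getLast?_concat, ne_eq, Option.some.injEq]
        exact fun he => hvr (by rw [he]; exact hx)
      have hdlast : desc.getLast? ≠ some v := hinv v List.mem_cons_self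
      have hrun := altLoop_run m (by omega) v r desc twice run hdlast
      rw [← hxs] at hrun
      rw [hrun]
      have hiff3 : (∃ w ∈ v :: t, 3 ≤ (v :: t).count w) ↔ (3 ≤ m ∨ ∃ w ∈ r, 3 ≤ r.count w) := by
        constructor
        · rintro ⟨w, hw, hc⟩
          by_cases hwv : w = v
          · subst hwv; left; rw [← hcv]; exact hc
          · right
            exact ⟨w, hmemr w hw hwv, by rw [← hcw w hwv]; exact hc⟩
        · rintro (h3 | ⟨w, hw, hc⟩)
          · exact ⟨v, List.mem_cons_self, by rw [hcv]; exact h3⟩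
          · have hwv : w ≠ v := fun he => hvr (he ▸ hw)
            exact ⟨w, List.mem_cons_of_mem _ (hrsub.mem hw), by rw [hcw w hwv]; exact hc⟩
      by_cases h3 : 3 ≤ m
      · rw [if_pos h3, if_pos (hiff3.mpr (Or.inl h3))]
      · rw [if_neg h3]
        rw [ih r hrlen hrpw (desc ++ [v]) _ (m : Int) hinv']
        have hiff3' : (∃ w ∈ r, 3 ≤ r.count w) ↔ (∃ w ∈ v :: t, 3 ≤ (v :: t).count w) := by
          constructor
          · intro q; exact hiff3.mpr (Or.inr q)
          · intro q; rcases hiff3.mp q with q' | q'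
            · exact absurd q' h3
            · exact q'
        by_cases hP : ∃ w ∈ v :: t, 3 ≤ (v :: t).count w
        · rw [if_pos (hiff3'.mpr hP), if_pos hP]
        · rw [if_neg (fun q => hP (hiff3'.mp q)), if_neg hP]
          have hofl : PySem.Set.ofList (v :: t) = v :: PySem.Set.ofList r := by
            rw [hxs]
            exact ofList_replicate_append m (by omega) v r hvr
          have hfilt : (PySem.Set.ofList (v :: t)).filter (fun w => (v :: t).count w == 2) =
              (if m == 2 then [v] else []) ++
                (PySem.Set.ofList r).filter (fun w => r.count w == 2) := by
            rw [hofl, List.filter_cons]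
            have htail : (PySem.Set.ofList r).filter (fun w => (v :: t).count w == 2) =
                (PySem.Set.ofList r).filter (fun w => r.count w == 2) := by
              apply List.filter_congr
              intro w hw
              have hwr : w ∈ r := (PySem.Set.mem_ofList r w).mp hw
              have hwv : w ≠ v := fun he => hvr (he ▸ hwr)
              rw [hcw w hwv]
            rw [htail, hcv]
            by_cases h2 : m = 2
            · have hb : (m == 2) = true := by simpa using h2
              rw [hb]
              simp
            · have hb : (m == 2) = false := by simpa using h2
              rw [hb]
              simp
          rw [hfilt, hofl]
          simp [List.append_assoc]
  -- (end of altLoop_spec)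

lemma set_update_self (s : PySem.Set Int) (xs : List Int) (h : ∀ x ∈ xs, x ∈ s) :
    PySem.Set.update s xs = s := by
  induction xs generalizing s with
  | nil => rfl
  | cons x xs ih =>
    have hs : PySem.Set.add s x = s := by
      have hx : x ∈ s := h x (by simp)
      simp [PySem.Set.add, PySem.Set.contains, hx]
    show PySem.Set.update (PySem.Set.add s x) xs = s
    rw [hs]
    exact ih s (fun y hy => h y (by simp [hy]))

lemma decrement_fold_getD (d : PySem.Dict Int Int) : ∀ (ks : List Int), ks.Nodup → ∀ (v : Int),
    (ks.foldl (fun d x => d.modify x 0 (fun y => y - 1)) d).getD v 0 =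
      d.getD v 0 - (if v ∈ ks then 1 else 0) := by
  intro ks
  induction ks generalizing d with
  | nil => simp
  | cons k ks ih =>
    intro hnd v
    simp only [List.foldl_cons]
    rw [ih _ (List.Nodup.of_cons hnd) v, PySem.Dict.getD_modify]
    by_cases hvk : v = k
    · subst hvk
      have : v ∉ ks := (List.nodup_cons.mp hnd).1
      simp [this]
    · simp [hvk]

lemma foldl_cons_if (p : Int → Bool) : ∀ (l acc : List Int),
    l.foldl (fun acc x => if p x then x :: acc else acc) acc = (l.filter p).reverse ++ acc
  | [], acc => by simp
  | x :: l, acc => by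
    simp only [List.foldl_cons, List.filter_cons]
    by_cases hx : p x = true
    · rw [if_pos hx, if_pos hx, foldl_cons_if p l (x :: acc)]
      simp
    · rw [if_neg hx, if_neg hx, foldl_cons_if p l acc]

lemma ofList_head (x : Int) (u : List Int) :
    (PySem.Set.ofList (x :: u)).head? = some x := by
  rw [PySem.Set.ofList_eq_foldl, List.foldl_cons]
  have h1 : PySem.Set.add ([] : List Int) x = [x] := by
    simp [PySem.Set.add, PySem.Set.contains]
  rw [h1, foldl_add_head u [x] (by simp)]
  rfl

-- ===== VERDICT (by name: the statement is the Claim_ definition above) =====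
theorem hillseq_spec : Claim_equal_hillseq := by
  intro arr n _hdom hpre
  obtain ⟨hn1, hor⟩ := hpre
  unfold Spec_hillseq
  obtain ⟨k, rfl⟩ : ∃ k : Nat, n = (k : Int) := ⟨n.toNat, (Int.toNat_of_nonneg (by omega)).symm⟩
  have hk1 : 1 ≤ k := by exact_mod_cast hn1
  set L := (PySem.List.sorted arr (fun x => x) false).reverse with hLdef
  have hLlen : L.length = arr.length := by
    rw [hLdef, List.length_reverse, PySem.List.length_sorted]
  have hLPW : L.Pairwise (fun a b : Int => b ≤ a) := by
    rw [hLdef]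
    exact List.pairwise_reverse.mpr (PySem.List.sorted_pairwise arr (fun x => x))
  have hLperm : L.Perm arr := by
    rw [hLdef]
    exact (List.reverse_perm _).trans (PySem.List.sorted_perm arr (fun x => x) false)
  have hEmptyInv : ∀ v : Int, (PySem.Dict.empty (κ := Int) (ν := Int)).contains v = true →
      (PySem.Dict.empty (κ := Int) (ν := Int)).getD v 0 = 1 ∨
      (PySem.Dict.empty (κ := Int) (ν := Int)).getD v 0 = 2 := by
    intro v hv; rw [PySem.Dict.contains_empty] at hv; cases hv
  by_cases hklen : k ≤ arr.length
  case neg =>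
    -- n > len(arr): Pre_ guarantees a triple, hit before the bad index; both return [-1]
    have htripL : ∃ v ∈ L, 3 ≤ L.count v := by
      have htrip : ∃ v ∈ arr, 3 ≤ arr.count v := by
        rcases hor with h | h
        · exact absurd (by exact_mod_cast h) hklen
        · exact h
      obtain ⟨v, hv, hc⟩ := htrip
      exact ⟨v, hLperm.mem_iff.mpr hv, by rw [hLperm.count_eq]; exact hc⟩
    have hsome : ∀ j ∈ PySem.List.pyRange 0 (L.length : Int), (PySem.List.pyGet? L j).isSome := by
      intro j hj
      obtain ⟨h0j, hjl⟩ := PySem.List.mem_pyRange_one.mp hj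
      obtain ⟨j', rfl⟩ : ∃ j' : Nat, j = (j' : Int) := ⟨j.toNat, (Int.toNat_of_nonneg h0j).symm⟩
      rw [PySem.List.pyGet?_natCast]
      have : j' < L.length := by exact_mod_cast hjl
      simp [List.getElem?_eq_getElem this]
    have hmap : (PySem.List.pyRange 0 (L.length : Int)).map
        (fun j => PySem.List.pyGetD L j 0) = L := by
      rw [map_pyGetD_pyRange_take L L.length le_rfl, List.take_length]
    have hn : (L.length : Int) ≤ (k : Int) := by
      rw [hLlen]
      exact_mod_cast Nat.le_of_lt (Nat.lt_of_not_le hklen)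
    have hcond : ∃ v ∈ L, 3 ≤ (PySem.Dict.empty (κ := Int) (ν := Int)).getD v 0
        + (L.count v : Int) := by
      obtain ⟨v, hv, hc⟩ := htripL
      refine ⟨v, hv, ?_⟩
      rw [PySem.Dict.getD_empty]
      omega
    have hA : hillseqLoop L (k : Int) 0 PySem.Dict.empty 0 = Sum.inl [-1] := by
      apply hillseqLoop_inl L (k : Int) hn L.length 0 _ _ _ (by simp) hsome
      rw [hmap, loopE_spec _ _ _ hEmptyInv, if_pos hcond]
    have hB : hillseqAltLoop L (k : Int) 0 [] [] 0 = Sum.inl [-1] := by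
      apply altLoop_inl L (k : Int) hn L.length 0 _ _ _ _ (by simp) hsome
      rw [hmap, altLoop_spec L.length L le_rfl hLPW [] [] 0 (by simp), if_pos htripL]
    simp only [hillseq, hillseq_alt]
    rw [sorted_rev_eq_reverse_sorted arr, ← hLdef, hA, hB]
  case pos =>
    have hkL : k ≤ L.length := by rw [hLlen]; exact hklen
    set first := L.take k with hfirstdef
    obtain ⟨a0, t, hLc⟩ : ∃ a0 t, L = a0 :: t := by
      cases hcase : L with
      | nil => rw [hcase] at hkL; simp at hkL; omega
      | cons a t => exact ⟨a, t, rfl⟩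
    have hfirstc : first = a0 :: t.take (k - 1) := by
      rw [hfirstdef, hLc]
      obtain ⟨k', rfl⟩ : ∃ k', k = k' + 1 := ⟨k - 1, by omega⟩
      simp
    have ha0first : a0 ∈ first := by rw [hfirstc]; exact List.mem_cons_self
    have hfirstPW : first.Pairwise (fun a b : Int => b ≤ a) := by
      rw [hfirstdef]
      exact hLPW.sublist (List.take_sublist k L)
    have hsome : ∀ i ∈ PySem.List.pyRange 0 (k : Int), (PySem.List.pyGet? L i).isSome := by
      intro i hi
      obtain ⟨h0i, hik⟩ := PySem.List.mem_pyRange_one.mp hi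
      obtain ⟨j, rfl⟩ : ∃ j : Nat, i = (j : Int) := ⟨i.toNat, (Int.toNat_of_nonneg h0i).symm⟩
      rw [PySem.List.pyGet?_natCast]
      have : j < L.length := by
        have : j < k := by exact_mod_cast hik
        omega
      simp [List.getElem?_eq_getElem this]
    have hloopA : hillseqLoop L (k : Int) 0 PySem.Dict.empty 0 =
        (if ∃ v ∈ first, 3 ≤ ((first.count v : Nat) : Int) then Sum.inl [-1]
        else Sum.inr (PySem.Dict.counter first,
          if ∃ v ∈ first, 2 ≤ ((first.count v : Nat) : Int) then 1 else 0)) := by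
      rw [hillseqLoop_eq_loopE _ _ k 0 _ _ (by omega) hsome,
        map_pyGetD_pyRange_take _ k hkL, ← hfirstdef, loopE_spec _ _ _ hEmptyInv]
      simp only [PySem.Dict.getD_empty, zero_add,
        PySem.Dict.foldl_insert_getD_add_one_eq_counter]
    have hloopB : hillseqAltLoop L (k : Int) 0 [] [] 0 =
        (if ∃ v ∈ first, 3 ≤ first.count v then Sum.inl [-1]
        else Sum.inr ([] ++ PySem.Set.ofList first,
          [] ++ (PySem.Set.ofList first).filter (fun v => first.count v == 2))) := by
      rw [altLoop_eq_loopE _ _ k 0 _ _ _ (by omega) hsome,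
        map_pyGetD_pyRange_take _ k hkL, ← hfirstdef,
        altLoop_spec first.length first le_rfl hfirstPW [] [] 0 (by simp)]
    set C := PySem.Dict.counter first with hCdef
    set S := PySem.Set.ofList first with hSdef
    have ha0S : a0 ∈ S := (PySem.Set.mem_ofList first a0).mpr ha0first
    have hnd : S.Nodup := PySem.Set.nodup_ofList first
    have hhead : L.head? = some a0 := by rw [hLc]; rfl
    have hP3iff : (∃ v ∈ first, 3 ≤ ((first.count v : Nat) : Int)) ↔
        (∃ v ∈ first, 3 ≤ first.count v) := by
      constructor <;> rintro ⟨v, hv, hc⟩ <;> exact ⟨v, hv, by exact_mod_cast hc⟩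
    simp only [hillseq, hillseq_alt]
    rw [sorted_rev_eq_reverse_sorted arr, ← hLdef, hloopA, hloopB]
    by_cases hP3 : ∃ v ∈ first, 3 ≤ first.count v
    · rw [if_pos (hP3iff.mpr hP3), if_pos hP3]
    · rw [if_neg (fun q => hP3 (hP3iff.mp q)), if_neg hP3]
      simp only [List.nil_append]
      -- per-value count bounds on the prefix
      have hcle : ∀ v ∈ first, first.count v ≤ 2 := by
        intro v hv
        by_contra hgt
        exact hP3 ⟨v, hv, by omega⟩
      have hc0ge1 : 1 ≤ first.count a0 := List.count_pos_iff.mpr ha0first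
      -- A's dict lookup of arr[0]
      have hcont : C.contains a0 = true := by
        rw [hCdef, PySem.Dict.contains_counter]
        simpa using ha0first
      obtain ⟨c0, hc0⟩ : ∃ c0, C.get? a0 = some c0 := by
        rw [PySem.Dict.contains_eq_isSome_get?] at hcont
        exact Option.isSome_iff_exists.mp hcont
      have hc0v : c0 = ((first.count a0 : Nat) : Int) := by
        have h1 := PySem.Dict.getD_of_get?_eq_some C 0 hc0
        rw [hCdef, PySem.Dict.getD_counter] at h1
        omega
      -- B's scan leaves desc = S (head a0) and twice = F
      have hShead : S.head? = some a0 := by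
        rw [hSdef, hfirstc]
        exact ofList_head _ _
      set F := S.filter (fun v => first.count v == 2) with hFdef
      have hF2 : (∃ v ∈ first, 2 ≤ ((first.count v : Nat) : Int)) ↔ F ≠ [] := by
        constructor
        · rintro ⟨v, hv, h2⟩
          have hv2 : first.count v = 2 := by
            have h2' : 2 ≤ first.count v := by exact_mod_cast h2
            have := hcle v hv
            omega
          have hmem : v ∈ F := List.mem_filter.mpr
            ⟨(PySem.Set.mem_ofList first v).mpr hv, by simp [hv2]⟩
          intro hFnil
          rw [hFnil] at hmem
          cases hmem
        · intro hne
          obtain ⟨v, hvF⟩ := List.exists_mem_of_ne_nil F hne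
          obtain ⟨hvS, hv2⟩ := List.mem_filter.mp hvF
          refine ⟨v, (PySem.Set.mem_ofList first v).mp hvS, ?_⟩
          have : first.count v = 2 := by simpa using hv2
          rw [this]
          norm_num
      rw [hhead, hShead]
      simp only [hc0]
      by_cases hpa : first.count a0 = 2
      · -- arr[0] occurs twice: both return [-1]
        have hgt : c0 > 1 := by rw [hc0v, hpa]; norm_num
        have hmemF : a0 ∈ F := List.mem_filter.mpr ⟨ha0S, by simp [hpa]⟩
        rw [if_pos hgt, if_pos (show F.contains a0 = true by simp [hmemF])]
      · -- arr[0] occurs once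
        have hpa1 : first.count a0 = 1 := by
          have := hcle a0 ha0first
          omega
        have hngt : ¬ (c0 > 1) := by rw [hc0v, hpa1]; norm_num
        have hnm : a0 ∉ F := by
          intro hm
          have := (List.mem_filter.mp hm).2
          simp [hpa1] at this
        rw [if_neg hngt]
        by_cases hFnil : F = []
        · -- no duplicate at all: A takes the flag = 0 branch, B returns arr
          have hnP2 : ¬ ∃ v ∈ first, 2 ≤ ((first.count v : Nat) : Int) :=
            fun q => (hF2.mp q) hFnil
          rw [if_neg hnP2]
          simp [hFnil]
        · -- duplicates: A rebuilds via its two dict passes, B returns F.reverse ++ S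
          have hP2 : ∃ v ∈ first, 2 ≤ ((first.count v : Nat) : Int) := hF2.mpr hFnil
          rw [if_pos hP2, if_neg (show ¬ F.contains a0 = true by simp [hnm]), if_neg hFnil]
          simp only [beq_self_eq_true, if_true]
          -- A's first pass appends all keys and decrements every stored count
          have hkeysC : C.keys = S := by rw [hCdef, PySem.Dict.keys_counter]
          have hkeys2 : (S.foldl (fun d kk => d.modify kk 0 (fun x => x - 1)) C).keys = S := by
            rw [PySem.Dict.keys_foldl_modify (f := fun _ _ => (fun x : Int => x - 1))]
            rw [hkeysC]
            exact set_update_self S S (fun x hx => hx)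
          have hget2 : ∀ v ∈ S, (S.foldl (fun d kk => d.modify kk 0 (fun x => x - 1)) C).getD v 0 =
              ((first.count v : Nat) : Int) - 1 := by
            intro v hv
            rw [decrement_fold_getD C S hnd v, if_pos hv, hCdef, PySem.Dict.getD_counter]
          have hfiltA : S.filter (fun kk =>
              (S.foldl (fun d kk => d.modify kk 0 (fun x => x - 1)) C).getD kk 0 == 1) = F := by
            rw [hFdef]
            apply List.filter_congr
            intro v hv
            rw [hget2 v hv, Bool.eq_iff_iff]
            simp only [beq_iff_eq]
            constructor <;> intro h <;> omega
          rw [PySem.List.foldl_prod_mk (f := fun (res : List Int) kk => res ++ [kk])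
            (g := fun (d : PySem.Dict Int Int) kk => d.modify kk 0 (fun x : Int => x - 1))]
          simp only [PySem.List.foldl_append_singleton_eq_self, List.nil_append]
          rw [hkeysC, hkeys2, foldl_cons_if _ S S, hfiltA]
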